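-- pv_equiv track=rewrite | github.com/OndrejZobal/Bachelor-thesis | thesis/source/extract-git-fixes.py | get_changed_line_number
-- ===== SOURCE A (Python) =====
-- def get_changed_line_number(prev, post):
--     shorter_length = min(len(prev), len(post))
--
--     for i in range(shorter_length):
--         if prev[i] != post[i]:
--             return i
--
--     if len(prev) != len(post):
--         return shorter_length
--
--     return None
-- ===== SOURCE B (Python) =====
-- def get_changed_line_number(prev, post):
--     # Binary search for the length of the longest common prefix: prefix
--     # equality prev[:m] == post[:m] is monotone in m, so the first differing
--     # index is found with O(log n) slice comparisons instead of an
--     # element-by-element scan.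
--     n = min(len(prev), len(post))
--     lo, hi = 0, n
--     while lo < hi:
--         mid = (lo + hi + 1) // 2
--         if prev[:mid] == post[:mid]:
--             lo = mid
--         else:
--             hi = mid - 1
--     return None if lo == len(prev) == len(post) else lo
-- ===== Notes on version B (the rewrite author's own statement) =====
-- stated objective: alternative
-- what changed: Replaces A's element-by-element scan (plus a separate length-mismatch fallback) with a binary search for the longest common prefix length using whole-slice comparisons, exploiting that prefix equality is monotone in the prefix length; the final answer is derived from that length by one arithmetic check.
import Mathlib
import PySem

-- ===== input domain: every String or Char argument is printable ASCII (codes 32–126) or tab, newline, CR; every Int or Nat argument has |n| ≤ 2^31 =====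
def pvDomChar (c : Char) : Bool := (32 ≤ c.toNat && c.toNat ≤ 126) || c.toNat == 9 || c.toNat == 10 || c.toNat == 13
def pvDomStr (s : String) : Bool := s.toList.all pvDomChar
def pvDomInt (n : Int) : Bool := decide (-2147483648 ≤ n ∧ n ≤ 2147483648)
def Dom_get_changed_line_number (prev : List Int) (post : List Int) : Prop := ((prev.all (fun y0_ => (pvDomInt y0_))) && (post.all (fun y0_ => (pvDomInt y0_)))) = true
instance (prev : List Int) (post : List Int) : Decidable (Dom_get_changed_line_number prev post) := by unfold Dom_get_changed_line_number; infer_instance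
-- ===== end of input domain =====

-- B replaces A's element-by-element scan (plus length-mismatch fallback) with a binary search
-- for the longest common prefix length via whole-slice comparisons; same return value.

-- ===== PORT A =====
-- loop 'for i in range(shorter_length): if prev[i] != post[i]: return i'
-- (i is always in range here, so comparing the pyGet? options is exact)
def pvAFind (prev post : List Int) : List Int → Option Int
  | [] => none
  | i :: rest =>
      if PySem.List.pyGet? prev i ≠ PySem.List.pyGet? post i then some i
      else pvAFind prev post rest

def get_changed_line_number (prev : List Int) (post : List Int) : Option Int :=
  let shorter_length : Int := min (prev.length : Int) (post.length : Int)
  match pvAFind prev post (PySem.List.pyRange 0 shorter_length 1) with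
  | some i => some i
  | none =>
      if (prev.length : Int) ≠ (post.length : Int) then some shorter_length
      else none

-- ===== PORT B =====
-- 'while lo < hi: mid = (lo+hi+1)//2; if prev[:mid]==post[:mid]: lo = mid else: hi = mid-1'
def pvBSearch (prev post : List Int) (lo hi : Int) : Int :=
  if h : lo < hi then
    let mid := PySem.Int.floordiv (lo + hi + 1) 2
    if PySem.List.slice prev none (some mid) = PySem.List.slice post none (some mid)
    then pvBSearch prev post mid hi
    else pvBSearch prev post lo (mid - 1)
  else lo
termination_by (hi - lo).toNat
decreasing_by
  all_goals
    simp only [PySem.Int.floordiv_eq_ediv_of_pos (show (0:Int) < 2 by omega)]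
    omega

def get_changed_line_number_alt (prev : List Int) (post : List Int) : Option Int :=
  let n : Int := min (prev.length : Int) (post.length : Int)
  let lo : Int := pvBSearch prev post 0 n
  if lo = (prev.length : Int) ∧ (prev.length : Int) = (post.length : Int) then none
  else some lo

-- ===== PRECONDITION & SPEC =====
def Spec_get_changed_line_number (prev : List Int) (post : List Int) (out : Option Int) : Prop := out = get_changed_line_number_alt prev post
instance (prev : List Int) (post : List Int) (out : Option Int) : Decidable (Spec_get_changed_line_number prev post out) := by unfold Spec_get_changed_line_number; infer_instance

-- ===== CLAIM (what is proved, stated in full; the proofs are below) =====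
def Claim_equal_get_changed_line_number : Prop := ∀ (prev : List Int) (post : List Int), Dom_get_changed_line_number prev post → Spec_get_changed_line_number prev post (get_changed_line_number prev post)

-- ===== LEMMAS AND PROOFS =====

-- length of the longest common prefix: the common yardstick both programs are reduced to
def pvPfx : List Int → List Int → Nat
  | a :: as, b :: bs => if a = b then pvPfx as bs + 1 else 0
  | _, _ => 0

lemma pvPfx_le : ∀ (prev post : List Int), pvPfx prev post ≤ min prev.length post.length := by
  intro prev
  induction prev with
  | nil => intro post; simp [pvPfx]
  | cons a as ih =>
      intro post
      cases post with
      | nil => simp [pvPfx]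
      | cons b bs =>
          by_cases hab : a = b
          · have := ih bs
            simp only [pvPfx, if_pos hab, List.length_cons]
            omega
          · simp [pvPfx, hab]

lemma pvTake_eq_iff : ∀ (prev post : List Int) (m : Nat),
    m ≤ min prev.length post.length →
    (prev.take m = post.take m ↔ m ≤ pvPfx prev post) := by
  intro prev
  induction prev with
  | nil =>
      intro post m hm
      have : m = 0 := by simp at hm; omega
      subst this; simp
  | cons a as ih =>
      intro post m hm
      cases post with
      | nil =>
          have : m = 0 := by simp at hm; omega
          subst this; simp
      | cons b bs =>
          cases m with
          | zero => simp
          | succ m' =>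
              have hm' : m' ≤ min as.length bs.length := by
                simp only [List.length_cons] at hm; omega
              simp only [List.take_succ_cons, List.cons.injEq]
              by_cases hab : a = b
              · rw [pvPfx, if_pos hab]
                constructor
                · rintro ⟨_, ht⟩
                  have := (ih bs m' hm').mp ht
                  omega
                · intro h
                  exact ⟨hab, (ih bs m' hm').mpr (by omega)⟩
              · rw [pvPfx, if_neg hab]
                constructor
                · rintro ⟨h, _⟩; exact absurd h hab
                · omega

lemma pvPfx_self : ∀ (l : List Int), pvPfx l l = l.length := by
  intro l
  induction l with
  | nil => simp [pvPfx]
  | cons a as ih => simp [pvPfx, ih]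

lemma pvPfx_full_eq (prev post : List Int)
    (h1 : pvPfx prev post = prev.length) (h2 : prev.length = post.length) :
    prev = post := by
  have hk : pvPfx prev post ≤ min prev.length post.length := pvPfx_le prev post
  have ht : prev.take (pvPfx prev post) = post.take (pvPfx prev post) :=
    (pvTake_eq_iff prev post (pvPfx prev post) hk).mpr (le_refl _)
  rw [h1] at ht
  rw [List.take_length] at ht
  rw [ht, h2, List.take_length]

lemma pvBSearch_eq (prev post : List Int) :
    ∀ (lo hi : Int), 0 ≤ lo → lo ≤ (pvPfx prev post : Int) →
      (pvPfx prev post : Int) ≤ hi →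
      hi ≤ min (prev.length : Int) (post.length : Int) →
      pvBSearch prev post lo hi = (pvPfx prev post : Int) := by
  intro lo hi
  induction lo, hi using pvBSearch.induct prev post with
  | case1 lo hi hlt mid heq ih =>
      intro h0 hlok hkhi hhin
      rw [pvBSearch, dif_pos hlt, if_pos heq]
      have hmid : lo < mid ∧ mid ≤ hi := by
        simp only [mid, PySem.Int.floordiv_eq_ediv_of_pos (show (0:Int) < 2 by omega)]
        omega
      have h0m : (0 : Int) ≤ mid := by omega
      have hmn : (mid.toNat : Int) = mid := Int.toNat_of_nonneg h0m
      have hmle : mid.toNat ≤ min prev.length post.length := by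
        have := hhin; push_cast at this ⊢; omega
      rw [PySem.List.slice_to prev h0m, PySem.List.slice_to post h0m] at heq
      have hk : mid ≤ (pvPfx prev post : Int) := by
        have := (pvTake_eq_iff prev post mid.toNat hmle).mp heq
        omega
      exact ih (by omega) hk hkhi hhin
  | case2 lo hi hlt mid hne ih =>
      intro h0 hlok hkhi hhin
      rw [pvBSearch, dif_pos hlt, if_neg hne]
      have hmid : lo < mid ∧ mid ≤ hi := by
        simp only [mid, PySem.Int.floordiv_eq_ediv_of_pos (show (0:Int) < 2 by omega)]
        omega
      have h0m : (0 : Int) ≤ mid := by omega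
      have hmle : mid.toNat ≤ min prev.length post.length := by
        have := hhin; push_cast at this ⊢; omega
      rw [PySem.List.slice_to prev h0m, PySem.List.slice_to post h0m] at hne
      have hk : (pvPfx prev post : Int) ≤ mid - 1 := by
        by_contra hc
        have hmk : mid ≤ (pvPfx prev post : Int) := by omega
        exact hne ((pvTake_eq_iff prev post mid.toNat hmle).mpr (by omega))
      exact ih h0 hlok hk (by omega)
  | case3 lo hi hnlt =>
      intro h0 hlok hkhi hhin
      rw [pvBSearch, dif_neg hnlt]
      omega

-- A reduced to pvPfx via the structural recursion pvFd
def pvFd : List Int → List Int → Option Int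
  | [], [] => none
  | [], _ :: _ => some 0
  | _ :: _, [] => some 0
  | a :: as, b :: bs => if a ≠ b then some 0 else (pvFd as bs).map (· + 1)

lemma pvRange_as_map (n : Nat) :
    PySem.List.pyRange 0 (n : Int) 1 = (List.range n).map (fun (k : Nat) => (k : Int)) := by
  induction n with
  | zero => simp [PySem.List.pyRange_one_eq_nil]
  | succ n ih =>
      rw [show (((n+1 : Nat)) : Int) = (n : Int) + 1 by push_cast; ring]
      rw [PySem.List.pyRange_one_succ_right (by positivity), ih, List.range_succ]
      simp

lemma pvRange_shift_map (n : Nat) :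
    PySem.List.pyRange 1 ((n : Int) + 1) 1 = (List.range n).map (fun (k : Nat) => 1 + (k : Int)) := by
  induction n with
  | zero => simp [PySem.List.pyRange_one_eq_nil]
  | succ n ih =>
      rw [show ((n+1 : Nat) : Int) + 1 = ((n : Int) + 1) + 1 by push_cast; ring]
      rw [PySem.List.pyRange_one_succ_right (by omega), ih, List.range_succ]
      simp [add_comm]

lemma pvAFind_shift (a b : Int) (as bs : List Int) (ks : List Nat) :
      pvAFind (a :: as) (b :: bs) (ks.map (fun (k : Nat) => 1 + (k : Int)))
        = (pvAFind as bs (ks.map (fun (k : Nat) => (k : Int)))).map (· + 1) := by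
  induction ks with
  | nil => rfl
  | cons k ks ih =>
      have h1 : PySem.List.pyGet? (a :: as) (1 + (k : Int)) = PySem.List.pyGet? as k := by
        rw [add_comm]; exact PySem.List.pyGet?_cons_succ a as k
      have h2 : PySem.List.pyGet? (b :: bs) (1 + (k : Int)) = PySem.List.pyGet? bs k := by
        rw [add_comm]; exact PySem.List.pyGet?_cons_succ b bs k
      simp only [List.map_cons]
      rw [pvAFind, pvAFind, h1, h2]
      split_ifs with h
      · simp only [Option.map_some, Option.some.injEq]; ring
      · exact ih

lemma pvA_eq_fd : ∀ (prev post : List Int), get_changed_line_number prev post = pvFd prev post := by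
  intro prev
  induction prev with
  | nil =>
      intro post
      cases post with
      | nil => rfl
      | cons b bs =>
          rw [get_changed_line_number, pvFd]
          have hmin : min ((([] : List Int).length : Int)) (((b :: bs).length : Int)) = 0 := by
            simp only [List.length_nil, List.length_cons]; push_cast; omega
          rw [hmin, PySem.List.pyRange_one_eq_nil (le_refl 0), pvAFind]
          simp only [List.length_nil, List.length_cons]
          rw [if_pos (by push_cast; omega)]
  | cons a as ih =>
      intro post
      cases post with
      | nil =>
          rw [get_changed_line_number, pvFd]
          have hmin : min (((a :: as).length : Int)) ((([] : List Int).length : Int)) = 0 := by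
            simp only [List.length_nil, List.length_cons]; push_cast; omega
          rw [hmin, PySem.List.pyRange_one_eq_nil (le_refl 0), pvAFind]
          simp only [List.length_nil, List.length_cons]
          rw [if_pos (by push_cast; omega)]
      | cons b bs =>
          have hm : min (((a :: as).length : Int)) (((b :: bs).length : Int))
              = ((min as.length bs.length : Nat) : Int) + 1 := by
            simp only [List.length_cons]; push_cast; omega
          have hcons : PySem.List.pyRange 0 (((min as.length bs.length : Nat) : Int) + 1) 1
              = 0 :: PySem.List.pyRange 1 (((min as.length bs.length : Nat) : Int) + 1) 1 :=
            PySem.List.pyRange_one_cons (by positivity)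
          rw [get_changed_line_number, hm, hcons, pvAFind,
            PySem.List.pyGet?_zero_cons, PySem.List.pyGet?_zero_cons]
          by_cases hab : a = b
          · have hhead : ¬ ((some a : Option Int) ≠ some b) := by simp [hab]
            rw [if_neg hhead]
            rw [pvRange_shift_map, pvAFind_shift, ← pvRange_as_map]
            rw [pvFd, if_neg (show ¬ (a ≠ b) by simp [hab])]
            have hmin2 : min ((as.length : Int)) ((bs.length : Int))
                = ((min as.length bs.length : Nat) : Int) := by push_cast; omega
            cases hfind : pvAFind as bs (PySem.List.pyRange 0 ((min as.length bs.length : Nat) : Int) 1) with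
            | some i =>
                have hfd : pvFd as bs = some i := by
                  rw [← ih bs, get_changed_line_number, hmin2, hfind]
                rw [hfd]
                simp
            | none =>
                have hfd : pvFd as bs
                    = (if ((as.length : Int) ≠ (bs.length : Int))
                       then some ((min as.length bs.length : Nat) : Int) else none) := by
                  rw [← ih bs, get_changed_line_number, hmin2, hfind]
                rw [hfd]
                simp only [Option.map_none]
                have hlen : ((((a :: as).length : Int)) ≠ (((b :: bs).length : Int)))
                    = ((as.length : Int) ≠ (bs.length : Int)) := by
                  simp only [List.length_cons, eq_iff_iff]; push_cast; omega
                simp only [hlen]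
                by_cases h : ((as.length : Int) ≠ (bs.length : Int)) <;> simp [h]
          · have hhead : ((some a : Option Int) ≠ some b) := by simp [hab]
            rw [if_pos hhead, pvFd, if_pos (show a ≠ b from hab)]

lemma pvFd_eq_pfx : ∀ (prev post : List Int),
    pvFd prev post = if prev = post then none else some ((pvPfx prev post : Nat) : Int) := by
  intro prev
  induction prev with
  | nil =>
      intro post
      cases post with
      | nil => rfl
      | cons b bs => simp [pvFd, pvPfx]
  | cons a as ih =>
      intro post
      cases post with
      | nil => simp [pvFd, pvPfx]
      | cons b bs =>
          by_cases hab : a = b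
          · subst hab
            rw [pvFd, if_neg (by simp), ih bs, pvPfx, if_pos rfl]
            by_cases h : as = bs
            · simp [h]
            · have : ¬ (a :: as = a :: bs) := by simp [h]
              simp only [if_neg h, if_neg this, Option.map_some]
              push_cast
              ring_nf
          · have : ¬ (a :: as = b :: bs) := by simp [hab]
            rw [pvFd, if_pos hab, if_neg this, pvPfx, if_neg hab]; simp

lemma pvB_eq_pfx : ∀ (prev post : List Int),
    get_changed_line_number_alt prev post
      = if prev = post then none else some ((pvPfx prev post : Nat) : Int) := by
  intro prev post
  have hk := pvPfx_le prev post
  have hbs : pvBSearch prev post 0 (min (prev.length : Int) (post.length : Int))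
      = (pvPfx prev post : Int) :=
    pvBSearch_eq prev post 0 _ (le_refl 0) (by positivity) (by exact_mod_cast hk)
      (le_refl _)
  rw [get_changed_line_number_alt]
  simp only [hbs]
  by_cases h : prev = post
  · subst h
    rw [if_pos ⟨by rw [pvPfx_self], rfl⟩, if_pos rfl]
  · rw [if_neg h, if_neg]
    rintro ⟨h1, h2⟩
    exact h (pvPfx_full_eq prev post (by exact_mod_cast h1) (by exact_mod_cast h2))

-- ===== VERDICT (by name: the statement is the Claim_ definition above) =====
theorem get_changed_line_number_spec : Claim_equal_get_changed_line_number := by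
  intro prev post _
  unfold Spec_get_changed_line_number
  rw [pvA_eq_fd, pvFd_eq_pfx, pvB_eq_pfx]
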